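-- pv_equiv track=rewrite | github.com/daniel-reich/turbo-robot | tY5fmSbk85N8digXQ_14.py | ones_infection
-- ===== SOURCE A (Python) =====
-- def ones_infection(arr):
--   temp = [0] * len(arr)
--   for i in range(len(temp)):
--     temp[i] = [0] * len(arr[0])
--   for i in range(len(arr)):
--     for x in range(len(arr[i])):
--       if 1 in arr[i] or 1 in [a[x] for a in arr]:
--         temp[i][x] = 1
--   for i in range(len(arr)):
--     for x in range(len(arr[i])):
--       if temp[i][x] == 1:
--         arr[i][x] = 1
--   return arr
-- ===== SOURCE B (Python) =====
-- # Precompute row-has-1 flags and the set of columns containing a 1 in one pass,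
-- # then build the result grid directly. Note: A mutates arr in place and returns it;
-- # B returns a fresh list (equivalence is about the return value).
-- def ones_infection(arr):
--     row_has = [1 in row for row in arr]
--     col_has = set()
--     for row in arr:
--         for x, v in enumerate(row):
--             if v == 1:
--                 col_has.add(x)
--     return [[1 if row_has[i] or x in col_has else v for x, v in enumerate(row)]
--             for i, row in enumerate(arr)]
-- ===== Notes on version B (the rewrite author's own statement) =====
-- stated objective: faster
-- what changed: B precomputes per-row has-1 flags and the set of columns containing a 1 in a single pass and then fills the grid, instead of A's per-cell rescan of the whole row and a freshly built column list; B also returns a fresh grid rather than mutating arr in place.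
import Mathlib
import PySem

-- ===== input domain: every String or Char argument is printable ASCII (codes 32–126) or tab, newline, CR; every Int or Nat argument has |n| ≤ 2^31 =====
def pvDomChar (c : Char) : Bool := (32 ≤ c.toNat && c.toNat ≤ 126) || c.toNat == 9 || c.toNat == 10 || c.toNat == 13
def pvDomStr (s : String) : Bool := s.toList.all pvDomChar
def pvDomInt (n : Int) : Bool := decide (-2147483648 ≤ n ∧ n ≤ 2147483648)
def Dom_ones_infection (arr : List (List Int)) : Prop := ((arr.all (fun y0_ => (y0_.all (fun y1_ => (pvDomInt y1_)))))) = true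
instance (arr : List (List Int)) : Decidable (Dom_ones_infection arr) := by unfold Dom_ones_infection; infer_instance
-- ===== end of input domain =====

-- B precomputes row-has-1 flags and the set of 1-columns in one pass (O(n*m)) instead of
-- A's per-cell rescans; A mutates arr in place and returns it, B builds a fresh grid —
-- the equivalence proved here is about the return value.

-- ===== PORT A =====
-- A-side helpers: the three statement groups of A's body, transliterated.
-- 'if 1 in arr[i] or 1 in [a[x] for a in arr]'
def condA (arr : List (List Int)) (i x : Nat) : Bool :=
  (arr.getD i []).contains 1 || (arr.map (fun a => a.getD x 0)).contains 1

-- 'temp = [0] * len(arr); for i in range(len(temp)): temp[i] = [0]*len(arr[0])'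
-- (the integer placeholders 0 are all overwritten before use; the Lean initial list uses
-- [] as the placeholder since a heterogeneous list cannot be typed)
def tempInit (arr : List (List Int)) : List (List Int) :=
  (List.range arr.length).foldl
    (fun t i => t.set i (List.replicate (arr.headD []).length (0 : Int)))
    (List.replicate arr.length ([] : List Int))

-- 'for i in range(len(arr)): for x in range(len(arr[i])): if …: temp[i][x] = 1'
def tempFill (arr : List (List Int)) : List (List Int) :=
  (List.range arr.length).foldl
    (fun t i =>
      (List.range ((arr.getD i []).length)).foldl
        (fun t x => if condA arr i x then t.set i ((t.getD i []).set x 1) else t) t)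
    (tempInit arr)

-- 'for i in range(len(arr)): for x in range(len(arr[i])): if temp[i][x] == 1: arr[i][x] = 1; return arr'
def ones_infection (arr : List (List Int)) : List (List Int) :=
  (List.range arr.length).foldl
    (fun ar i =>
      (List.range ((ar.getD i []).length)).foldl
        (fun ar x =>
          if ((tempFill arr).getD i []).getD x 0 == 1 then ar.set i ((ar.getD i []).set x 1) else ar)
        ar)
    arr

-- ===== PORT B =====
-- B-side helper: 'col_has = set(); for row in arr: for x, v in enumerate(row): if v == 1: col_has.add(x)'
def colSetB (arr : List (List Int)) : PySem.Set Int :=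
  arr.foldl
    (fun s row =>
      (PySem.List.enumerate row 0).foldl
        (fun s xv => if xv.2 == 1 then PySem.Set.add s xv.1 else s) s)
    PySem.Set.empty

def ones_infection_alt (arr : List (List Int)) : List (List Int) :=
  let rowHas := arr.map (fun row => row.contains (1 : Int))
  let colHas := colSetB arr
  (PySem.List.enumerate arr 0).map (fun ir =>
    (PySem.List.enumerate ir.2 0).map (fun xv =>
      if PySem.List.pyGetD rowHas ir.1 false || PySem.Set.contains colHas xv.1
      then (1 : Int) else xv.2))

-- ===== PRECONDITION & SPEC =====
-- Pre_ excludes exactly the inputs on which A raises IndexError: ragged grids where a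
-- row containing a 1 is longer than row 0 (temp[i][x] write out of range), or a 1-free
-- row is longer than some other row (the column comprehension a[x] runs out of range).
def Pre_ones_infection (arr : List (List Int)) : Prop :=
  ∀ row ∈ arr,
    ((1 : Int) ∈ row → row.length ≤ (arr.headD []).length) ∧
    ((1 : Int) ∉ row → ∀ a ∈ arr, row.length ≤ a.length)
instance (arr : List (List Int)) : Decidable (Pre_ones_infection arr) := by
  unfold Pre_ones_infection; infer_instance
def pvWitness_ones_infection : List (List Int) := [[1, 0, 2], [0, 1, 5], [0, 0, 0]]

def Spec_ones_infection (arr : List (List Int)) (out : List (List Int)) : Prop := out = ones_infection_alt arr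
instance (arr : List (List Int)) (out : List (List Int)) : Decidable (Spec_ones_infection arr out) := by unfold Spec_ones_infection; infer_instance

-- ===== CLAIM (what is proved, stated in full; the proofs are below) =====
def Claim_equal_ones_infection : Prop := ∀ (arr : List (List Int)), Dom_ones_infection arr → Pre_ones_infection arr → Spec_ones_infection arr (ones_infection arr)

-- ===== LEMMAS AND PROOFS =====


lemma foldl_range_set {α : Type} (d : α) (h : Nat → α → α) (n : Nat) (t : List α) :
    (List.range n).foldl (fun t i => t.set i (h i (t.getD i d))) t
      = t.mapIdx (fun j a => if j < n then h j a else a) := by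
  induction n with
  | zero =>
      simp
      apply List.ext_getElem (by simp)
      intro j h1 h2; simp [List.getElem_mapIdx]
  | succ n ih =>
      rw [List.range_succ, List.foldl_append, ih]
      simp only [List.foldl_cons, List.foldl_nil]
      by_cases hn : n < t.length
      · have hg : (t.mapIdx fun j a => if j < n then h j a else a).getD n d = t[n] := by
          rw [List.getD_eq_getElem?_getD, List.getElem?_eq_getElem (by simpa using hn)]
          simp [List.getElem_mapIdx]
        rw [hg]
        apply List.ext_getElem (by simp)
        intro j h1 h2
        rw [List.getElem_set]
        simp only [List.getElem_mapIdx]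
        by_cases hj : j = n
        · subst hj; simp
        · rw [if_neg (by omega)]
          by_cases h' : j < n
          · rw [if_pos h', if_pos (by omega)]
          · rw [if_neg h', if_neg (by omega)]
      · apply List.ext_getElem (by simp)
        intro j h1 h2
        have hj : j ≠ n := by simp at h1; omega
        have hlt : j < n := by simp at h1; omega
        rw [List.getElem_set, if_neg (by omega)]
        simp [List.getElem_mapIdx, hlt]
        intro hc; exact absurd hc (by omega)


lemma foldl_set_row (c : Nat → Bool) (i : Nat) (xs : List Nat) :
    ∀ (t : List (List Int)),
      xs.foldl (fun t x => if c x then t.set i ((t.getD i []).set x 1) else t) t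
        = t.set i (xs.foldl (fun r x => if c x then r.set x 1 else r) (t.getD i [])) := by
  induction xs with
  | nil =>
      intro t
      simp only [List.foldl_nil]
      by_cases hi : i < t.length
      · rw [List.getD_eq_getElem?_getD, List.getElem?_eq_getElem hi]
        simp [List.set_getElem_self]
      · rw [List.set_eq_of_length_le (by omega)]
  | cons x xs ih =>
      intro t
      simp only [List.foldl_cons]
      by_cases hc : c x
      · simp only [hc, if_pos]
        rw [ih]
        by_cases hi : i < t.length
        · have hg : (t.set i ((t.getD i []).set x 1)).getD i [] = (t.getD i []).set x 1 := by
            rw [List.getD_eq_getElem?_getD, List.getElem?_eq_getElem (by simpa using hi)]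
            simp
          rw [hg, List.set_set]
        · rw [List.set_eq_of_length_le (by simp only [List.length_set]; omega),
              List.set_eq_of_length_le (by omega), List.set_eq_of_length_le (by omega)]
      · simp only [hc]
        rw [ih]
        simp

lemma row_body_eq (c : Nat → Bool) :
    (fun (r : List Int) (x : Nat) => if c x then r.set x 1 else r)
      = fun (r : List Int) (x : Nat) => r.set x (if c x then (1 : Int) else r.getD x 0) := by
  funext r x
  by_cases hc : c x
  · rw [if_pos hc, if_pos hc]
  · rw [if_neg hc, if_neg hc]
    by_cases hx : x < r.length
    · rw [List.getD_eq_getElem?_getD, List.getElem?_eq_getElem hx]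
      simp [List.set_getElem_self]
    · rw [List.set_eq_of_length_le (by omega)]

lemma rowFill_char (c : Nat → Bool) (n : Nat) (r : List Int) :
    (List.range n).foldl (fun r x => if c x then r.set x 1 else r) r
      = r.mapIdx (fun j a => if j < n then (if c j then 1 else a) else a) := by
  rw [row_body_eq c]
  exact foldl_range_set (0 : Int) (fun x v => if c x then (1 : Int) else v) n r

lemma tempInit_char' (arr : List (List Int)) :
    (List.range arr.length).foldl
        (fun t i => t.set i (List.replicate (arr.headD []).length (0 : Int)))
        (List.replicate arr.length ([] : List Int))
      = List.replicate arr.length (List.replicate (arr.headD []).length (0 : Int)) := by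
  refine (foldl_range_set ([] : List Int)
      (fun _ _ => List.replicate (arr.headD []).length (0 : Int)) arr.length _).trans ?_
  apply List.ext_getElem (by simp)
  intro j h1 h2
  have hj : j < arr.length := by simpa using h2
  simp only [List.getElem_mapIdx, List.getElem_replicate]
  rw [if_pos hj]


lemma tempInit_char (arr : List (List Int)) :
    tempInit arr = List.replicate arr.length (List.replicate (arr.headD []).length (0 : Int)) :=
  tempInit_char' arr

-- generic matrix pass: each row i is replaced by a per-row fold over range (n i)
lemma matrix_pass_char (c : Nat → Nat → Bool) (n : Nat → Nat) (t : List (List Int)) (L : Nat) :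
    (List.range L).foldl
        (fun t i =>
          (List.range (n i)).foldl
            (fun t x => if c i x then t.set i ((t.getD i []).set x 1) else t) t) t
      = t.mapIdx (fun i row => if i < L then
          row.mapIdx (fun x v => if x < n i then (if c i x then 1 else v) else v) else row) := by
  have hb : (fun (t : List (List Int)) (i : Nat) =>
        (List.range (n i)).foldl
          (fun t x => if c i x then t.set i ((t.getD i []).set x 1) else t) t)
      = fun t i => t.set i ((List.range (n i)).foldl
          (fun r x => if c i x then r.set x 1 else r) (t.getD i [])) := by
    funext t i
    exact foldl_set_row (c i) i _ t
  rw [hb]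
  refine (foldl_range_set ([] : List Int)
      (fun i row => (List.range (n i)).foldl (fun r x => if c i x then r.set x 1 else r) row) L t).trans ?_
  apply List.ext_getElem (by simp)
  intro j h1 h2
  simp only [List.getElem_mapIdx]
  by_cases hj : j < L
  · rw [if_pos hj, if_pos hj, rowFill_char]
  · rw [if_neg hj, if_neg hj]

lemma getD_mapIdx_replicate (f : Nat → List Int → List Int) (L : Nat) (r0 : List Int)
    (i : Nat) (hi : i < L) :
    (List.mapIdx f (List.replicate L r0)).getD i [] = f i r0 := by
  rw [List.getD_eq_getElem?_getD, List.getElem?_eq_getElem (by simpa using hi)]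
  simp [List.getElem_mapIdx]

lemma getD_mapIdx_replicate0 (g : Nat → Int → Int) (m : Nat) (x : Nat) :
    (List.mapIdx g (List.replicate m (0 : Int))).getD x 0 = if x < m then g x 0 else 0 := by
  by_cases hx : x < m
  · rw [List.getD_eq_getElem?_getD, List.getElem?_eq_getElem (by simpa using hx)]
    simp [List.getElem_mapIdx, hx]
  · rw [List.getD_eq_getElem?_getD, List.getElem?_eq_none (by simpa using hx)]
    simp [hx]

lemma tempFill_get (arr : List (List Int)) (i x : Nat) (hi : i < arr.length) :
    ((tempFill arr).getD i []).getD x 0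
      = if x < (arr.headD []).length ∧ x < (arr.getD i []).length ∧ condA arr i x = true
        then 1 else 0 := by
  unfold tempFill
  rw [tempInit_char, matrix_pass_char (fun i x => condA arr i x) (fun i => (arr.getD i []).length)]
  rw [getD_mapIdx_replicate _ _ _ i hi, if_pos hi, getD_mapIdx_replicate0]
  by_cases hx : x < (arr.headD []).length
  · rw [if_pos hx]
    by_cases h1 : x < (arr.getD i []).length
    · by_cases h2 : condA arr i x
      · rw [if_pos h1, if_pos h2, if_pos ⟨hx, h1, h2⟩]
      · rw [if_pos h1, if_neg h2, if_neg (by tauto)]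
    · rw [if_neg h1, if_neg (by tauto)]
  · rw [if_neg hx, if_neg (by tauto)]

lemma onesA_char (arr : List (List Int)) :
    ones_infection arr = arr.mapIdx (fun i row => row.mapIdx (fun x v =>
      if ((tempFill arr).getD i []).getD x 0 == 1 then 1 else v)) := by
  unfold ones_infection
  have hb : (fun (ar : List (List Int)) (i : Nat) =>
        (List.range ((ar.getD i []).length)).foldl
          (fun ar x => if ((tempFill arr).getD i []).getD x 0 == 1
            then ar.set i ((ar.getD i []).set x 1) else ar) ar)
      = fun ar i => ar.set i ((List.range ((ar.getD i []).length)).foldl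
          (fun r x => if ((tempFill arr).getD i []).getD x 0 == 1 then r.set x 1 else r) (ar.getD i [])) := by
    funext ar i
    exact foldl_set_row (fun x => ((tempFill arr).getD i []).getD x 0 == 1) i _ ar
  rw [hb]
  have hb2 : (fun (ar : List (List Int)) (i : Nat) => ar.set i ((List.range ((ar.getD i []).length)).foldl
          (fun r x => if ((tempFill arr).getD i []).getD x 0 == 1 then r.set x 1 else r) (ar.getD i [])))
      = fun ar i => ar.set i ((fun (i : Nat) (row : List Int) => (List.range row.length).foldl
          (fun r x => if ((tempFill arr).getD i []).getD x 0 == 1 then r.set x 1 else r) row) i (ar.getD i [])) := rfl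
  rw [hb2]
  refine (foldl_range_set ([] : List Int)
      (fun (i : Nat) (row : List Int) => (List.range row.length).foldl
        (fun r x => if ((tempFill arr).getD i []).getD x 0 == 1 then r.set x 1 else r) row)
      arr.length arr).trans ?_
  apply List.ext_getElem (by simp)
  intro j h1 h2
  have hj : j < arr.length := by simpa using h2
  simp only [List.getElem_mapIdx, if_pos hj]
  rw [rowFill_char]
  apply List.ext_getElem (by simp)
  intro x hx1 hx2
  have hx : x < arr[j].length := by simpa using hx2
  simp only [List.getElem_mapIdx, if_pos hx]


lemma map_enum {α β : Type} (f : Int → α → β) (xs : List α) :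
    ∀ (s : Int), (PySem.List.enumerate xs s).map (fun p => f p.1 p.2)
      = xs.mapIdx (fun i a => f (s + i) a) := by
  induction xs with
  | nil => intro s; simp [PySem.List.enumerate_nil]
  | cons x xs ih =>
      intro s
      rw [PySem.List.enumerate_cons, List.map_cons, ih (s + 1), List.mapIdx_cons]
      congr 1
      · simp
      · apply List.ext_getElem (by simp)
        intro j h1 h2
        simp only [List.getElem_mapIdx]
        congr 1
        push_cast
        ring

lemma enum_fold_mem (row : List Int) :
    ∀ (s0 : Int) (s : PySem.Set Int) (y : Int),
      (y ∈ (PySem.List.enumerate row s0).foldl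
          (fun s xv => if xv.2 == 1 then PySem.Set.add s xv.1 else s) s)
        ↔ y ∈ s ∨ ∃ k : Nat, y = s0 + k ∧ row[k]? = some 1 := by
  induction row with
  | nil => intro s0 s y; simp [PySem.List.enumerate_nil]
  | cons x xs ih =>
      intro s0 s y
      rw [PySem.List.enumerate_cons, List.foldl_cons]
      rw [ih (s0 + 1)]
      constructor
      · rintro (hy | ⟨k, hk1, hk2⟩)
        · by_cases hx : x == 1
          · rw [if_pos hx] at hy
            rcases (PySem.Set.mem_add s s0 y).mp hy with h | h
            · exact Or.inl h
            · refine Or.inr ⟨0, by simpa using h, by simpa using hx⟩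
          · rw [if_neg hx] at hy
            exact Or.inl hy
        · exact Or.inr ⟨k + 1, by push_cast; omega, by simpa using hk2⟩
      · rintro (hy | ⟨k, hk1, hk2⟩)
        · left
          by_cases hx : x == 1
          · rw [if_pos hx]; exact (PySem.Set.mem_add s s0 y).mpr (Or.inl hy)
          · rw [if_neg hx]; exact hy
        · match k with
          | 0 =>
              left
              simp only [List.getElem?_cons_zero, Option.some.injEq] at hk2
              rw [if_pos (by simpa using hk2)]
              exact (PySem.Set.mem_add s s0 y).mpr (Or.inr (by simpa using hk1))
          | k + 1 =>
              right
              exact ⟨k, by push_cast at hk1 ⊢; omega, by simpa using hk2⟩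

lemma colSetB_mem (arr : List (List Int)) (y : Int) :
    y ∈ colSetB arr ↔ ∃ row ∈ arr, ∃ k : Nat, y = (k : Int) ∧ row[k]? = some 1 := by
  unfold colSetB
  suffices h : ∀ (s : PySem.Set Int),
      (y ∈ arr.foldl (fun s row => (PySem.List.enumerate row 0).foldl
          (fun s xv => if xv.2 == 1 then PySem.Set.add s xv.1 else s) s) s)
        ↔ y ∈ s ∨ ∃ row ∈ arr, ∃ k : Nat, y = (k : Int) ∧ row[k]? = some 1 by
    rw [h PySem.Set.empty]
    simp [PySem.Set.empty]
  induction arr with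
  | nil => intro s; simp
  | cons row rows ih =>
      intro s
      rw [List.foldl_cons, ih, enum_fold_mem row 0 s y]
      constructor
      · rintro ((h | ⟨k, h1, h2⟩) | ⟨r, hr, hk⟩)
        · exact Or.inl h
        · exact Or.inr ⟨row, by simp, k, by simpa using h1, h2⟩
        · exact Or.inr ⟨r, by simp [hr], hk⟩
      · rintro (h | ⟨r, hr, k, h1, h2⟩)
        · exact Or.inl (Or.inl h)
        · rcases List.mem_cons.mp hr with rfl | hr'
          · exact Or.inl (Or.inr ⟨k, by simpa using h1, h2⟩)
          · exact Or.inr ⟨r, hr', k, h1, h2⟩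

lemma getD_eq_one_iff (a : List Int) (x : Nat) : a.getD x 0 = 1 ↔ a[x]? = some 1 := by
  rw [List.getD_eq_getElem?_getD]
  cases h : a[x]? <;> simp

lemma colEq (arr : List (List Int)) (x : Nat) :
    (arr.map (fun a => a.getD x 0)).contains 1 = PySem.Set.contains (colSetB arr) (x : Int) := by
  rw [Bool.eq_iff_iff, PySem.Set.contains_iff, colSetB_mem, List.contains_iff_mem]
  simp only [List.mem_map]
  constructor
  · rintro ⟨a, ha, he⟩
    exact ⟨a, ha, x, rfl, (getD_eq_one_iff a x).mp he⟩
  · rintro ⟨row, hr, k, hk, h2⟩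
    have : k = x := by exact_mod_cast hk.symm
    subst this
    exact ⟨row, hr, (getD_eq_one_iff row k).mpr h2⟩

lemma onesB_char (arr : List (List Int)) :
    ones_infection_alt arr = arr.mapIdx (fun i row => row.mapIdx (fun x v =>
      if (arr.getD i []).contains 1 || PySem.Set.contains (colSetB arr) (x : Int) then 1 else v)) := by
  unfold ones_infection_alt
  rw [map_enum (fun i row => (PySem.List.enumerate row 0).map (fun xv =>
      if PySem.List.pyGetD (arr.map (fun row => row.contains (1:Int))) i false
         || PySem.Set.contains (colSetB arr) xv.1 then (1:Int) else xv.2)) arr 0]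
  apply List.ext_getElem (by simp)
  intro j h1 h2
  simp only [List.getElem_mapIdx]
  rw [map_enum (fun xIdx v =>
      if PySem.List.pyGetD (arr.map (fun row => row.contains (1:Int))) ((0:Int) + j) false
         || PySem.Set.contains (colSetB arr) xIdx then (1:Int) else v)]
  apply List.ext_getElem (by simp)
  intro x hx1 hx2
  simp only [List.getElem_mapIdx]
  have hj : j < arr.length := by simpa using h2
  simp [List.getElem?_eq_getElem hj]


-- every row of a grid satisfying Pre_ is at most as long as row 0
lemma pre_row_le (arr : List (List Int)) (hpre : Pre_ones_infection arr)
    (i : Nat) (hi : i < arr.length) : (arr.getD i []).length ≤ (arr.headD []).length := by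
  have hmem : arr[i] ∈ arr := List.getElem_mem hi
  have hget : arr.getD i [] = arr[i] := by
    rw [List.getD_eq_getElem?_getD, List.getElem?_eq_getElem hi]; rfl
  rw [hget]
  rcases hpre arr[i] hmem with ⟨h1, h2⟩
  by_cases hone : (1 : Int) ∈ arr[i]
  · exact h1 hone
  · have hhead : arr.headD [] ∈ arr := by
      cases arr with
      | nil => simp at hi
      | cons a as => simp
    exact h2 hone _ hhead

theorem main (arr : List (List Int)) (hpre : Pre_ones_infection arr) :
    ones_infection arr = ones_infection_alt arr := by
  rw [onesA_char, onesB_char]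
  apply List.ext_getElem (by simp)
  intro i h1 h2
  have hi : i < arr.length := by simpa using h1
  apply List.ext_getElem (by simp)
  intro x hx1 hx2
  simp only [List.getElem_mapIdx]
  have hget : arr.getD i [] = arr[i] := by
    rw [List.getD_eq_getElem?_getD, List.getElem?_eq_getElem hi]; rfl
  have hx : x < (arr.getD i []).length := by rw [hget]; simpa using hx1
  rw [tempFill_get arr i x hi]
  have hxm : x < (arr.headD []).length := lt_of_lt_of_le hx (pre_row_le arr hpre i hi)
  by_cases hc : condA arr i x
  · rw [if_pos (show x < (arr.headD []).length ∧ x < (arr.getD i []).length ∧ condA arr i x = true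
        from ⟨hxm, hx, hc⟩)]
    have hc' : ((arr.getD i []).contains 1 || PySem.Set.contains (colSetB arr) (x : Int)) = true := by
      rw [← colEq]
      simpa [condA] using hc
    rw [hc']
    simp
  · rw [if_neg (show ¬ (x < (arr.headD []).length ∧ x < (arr.getD i []).length ∧ condA arr i x = true)
        from fun h => hc h.2.2)]
    have hc' : ¬ (((arr.getD i []).contains 1 || PySem.Set.contains (colSetB arr) (x : Int)) = true) := by
      rw [← colEq]
      simpa [condA] using hc
    rw [if_neg hc']
    simp


-- ===== VERDICT (by name: the statement is the Claim_ definition above) =====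
theorem ones_infection_spec : Claim_equal_ones_infection := by
  intro arr _ hpre
  exact main arr hpre
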